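-- pv_equiv track=rewrite | github.com/jebreimo/Argen | Argen/parse_help_text.py | calculate_group_width
-- ===== SOURCE A (Python) =====
-- def calculate_group_width(text, whitespace, locations):
--     widths = []
--     for index, line_number in locations:
--         widths.append(len(text[index]))
--     widths.sort()
--     if len(widths) <= 3:
--         width = widths[0]
--     elif len(whitespace) + widths[-1] < 32:
--         return widths[-1]
--     else:
--         n = len(widths)
--         n_75 = (n * 75) // 100
--         typical_width = widths[n_75]
--         width = typical_width
--         for i in range(n_75 + 1, n):
--             if widths[i] < typical_width + 10:
--                 width = widths[i]
--     return min(36 - len(whitespace), width)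
-- ===== SOURCE B (Python) =====
-- def _select(xs, k):
--     # k-th smallest (0-based) by quickselect with middle pivot; no sorting.
--     pivot = xs[len(xs) // 2]
--     lt = [x for x in xs if x < pivot]
--     eq = [x for x in xs if x == pivot]
--     if k < len(lt):
--         return _select(lt, k)
--     if k < len(lt) + len(eq):
--         return pivot
--     return _select([x for x in xs if x > pivot], k - len(lt) - len(eq))
--
--
-- def calculate_group_width(text, whitespace, locations):
--     widths = [len(text[index]) for index, _line_number in locations]
--     n = len(widths)
--     if n <= 3:
--         width = min(widths)
--     else:
--         hi = max(widths)
--         if len(whitespace) + hi < 32: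
--             return hi
--         typical = _select(widths, (n * 75) // 100)
--         width = max(w for w in widths if w < typical + 10)
--     return min(36 - len(whitespace), width)
-- ===== Notes on version B (the rewrite author's own statement) =====
-- stated objective: alternative
-- what changed: Replaces the full sort with one-pass min/max and a quickselect for the 75th-percentile order statistic, then takes the max of the widths below the typical+10 threshold instead of scanning the sorted tail.
import Mathlib
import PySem

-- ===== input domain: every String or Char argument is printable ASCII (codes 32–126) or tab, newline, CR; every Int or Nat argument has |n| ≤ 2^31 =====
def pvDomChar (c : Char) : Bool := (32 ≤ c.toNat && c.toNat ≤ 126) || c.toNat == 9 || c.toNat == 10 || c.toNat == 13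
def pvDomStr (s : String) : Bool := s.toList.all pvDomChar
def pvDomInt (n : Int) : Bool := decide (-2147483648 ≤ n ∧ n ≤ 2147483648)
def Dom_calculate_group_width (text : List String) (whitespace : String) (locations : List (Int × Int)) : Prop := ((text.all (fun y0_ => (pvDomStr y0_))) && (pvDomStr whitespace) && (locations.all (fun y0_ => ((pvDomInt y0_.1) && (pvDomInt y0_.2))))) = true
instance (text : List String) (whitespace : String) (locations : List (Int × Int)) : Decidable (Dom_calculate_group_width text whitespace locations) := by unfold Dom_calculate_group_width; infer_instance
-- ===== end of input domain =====

-- B avoids A's full sort: it computes min/max directly and the 75th-percentile width by quickselect,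
-- then takes the max of the widths below the typical+10 threshold (alternative algorithm, same cost in practice).

-- ===== PORT A =====
def calculate_group_width (text : List String) (whitespace : String) (locations : List (Int × Int)) : Int :=
  let widths0 : List Int := locations.foldl (fun acc p => acc ++ [PySem.Str.len ((PySem.List.pyGet? text p.1).getD "")]) []
  let widths : List Int := PySem.List.sorted widths0 (fun x => x) false
  if widths.length ≤ 3 then
    min (36 - PySem.Str.len whitespace) (PySem.List.pyGetD widths 0 0)
  else if PySem.Str.len whitespace + PySem.List.pyGetD widths (-1) 0 < 32 then
    PySem.List.pyGetD widths (-1) 0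
  else
    let n : Int := (widths.length : Int)
    let n75 : Int := PySem.Int.floordiv (n * 75) 100
    let typical := PySem.List.pyGetD widths n75 0
    let width := (PySem.List.pyRange (n75 + 1) n 1).foldl
      (fun w i => if PySem.List.pyGetD widths i 0 < typical + 10 then PySem.List.pyGetD widths i 0 else w) typical
    min (36 - PySem.Str.len whitespace) width

-- ===== PORT B =====

-- helper cited by pvSelect's termination/definition
theorem pv_filter_lt {xs : List Int} {pv : Int} {p : Int → Bool} (h : pv ∈ xs) (hp : p pv = false) :
    (xs.filter p).length < xs.length := by
  have h1 := List.length_eq_length_filter_add (l := xs) p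
  have h2 : 0 < (xs.filter (fun x => ! p x)).length :=
    List.length_pos_iff.mpr (List.ne_nil_of_mem (List.mem_filter.mpr ⟨h, by simp [hp]⟩))
  omega

-- quickselect: k-th smallest of xs (middle pivot); the [] case is unreachable for k < xs.length
def pvSelect (xs : List Int) (k : Nat) : Int :=
  if hx : xs = [] then 0
  else
    let pivot := xs.getD (xs.length / 2) 0
    have hmem : pivot ∈ xs := by
      have hl : 0 < xs.length := List.length_pos_iff.mpr hx
      have hlt : xs.length / 2 < xs.length := Nat.div_lt_self hl (by omega)
      show xs.getD (xs.length / 2) 0 ∈ xs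
      rw [List.getD_eq_getElem xs 0 hlt]
      exact List.getElem_mem hlt
    let lt := xs.filter (fun x => x < pivot)
    let eq := xs.filter (fun x => x = pivot)
    if k < lt.length then
      have : lt.length < xs.length := pv_filter_lt hmem (decide_eq_false (lt_irrefl pivot))
      pvSelect lt k
    else if k < lt.length + eq.length then pivot
    else
      have : (xs.filter (fun x => pivot < x)).length < xs.length := pv_filter_lt hmem (decide_eq_false (lt_irrefl pivot))
      pvSelect (xs.filter (fun x => pivot < x)) (k - lt.length - eq.length)
termination_by xs.length
decreasing_by
  · exact this
  · exact this

def calculate_group_width_alt (text : List String) (whitespace : String) (locations : List (Int × Int)) : Int :=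
  let widths : List Int := locations.map (fun p => PySem.Str.len ((PySem.List.pyGet? text p.1).getD ""))
  let n := widths.length
  if n ≤ 3 then
    min (36 - PySem.Str.len whitespace) ((PySem.List.min? widths (fun x => x)).getD 0)
  else
    let hi := (PySem.List.max? widths (fun x => x)).getD 0
    if PySem.Str.len whitespace + hi < 32 then hi
    else
      let typical := pvSelect widths ((n * 75) / 100)
      let width := (PySem.List.max? (widths.filter (fun w => w < typical + 10)) (fun x => x)).getD 0
      min (36 - PySem.Str.len whitespace) width

-- ===== PRECONDITION & SPEC =====
-- Pre_ excludes exactly the inputs where A raises: empty locations (widths[0] -> IndexError)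
-- and any index not valid for text (text[index] -> IndexError).
def Pre_calculate_group_width (text : List String) (whitespace : String) (locations : List (Int × Int)) : Prop :=
  locations ≠ [] ∧ ∀ p ∈ locations, PySem.Raise.InRange text.length p.1
instance (text : List String) (whitespace : String) (locations : List (Int × Int)) : Decidable (Pre_calculate_group_width text whitespace locations) := by unfold Pre_calculate_group_width; infer_instance

def pvWitness_calculate_group_width : List String × String × (List (Int × Int)) :=
  (["ab", "cde"], " ", [(0, 1), (1, 2), (-1, 3)])

def Spec_calculate_group_width (text : List String) (whitespace : String) (locations : List (Int × Int)) (out : Int) : Prop := out = calculate_group_width_alt text whitespace locations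
instance (text : List String) (whitespace : String) (locations : List (Int × Int)) (out : Int) : Decidable (Spec_calculate_group_width text whitespace locations out) := by unfold Spec_calculate_group_width; infer_instance

-- ===== CLAIM (what is proved, stated in full; the proofs are below) =====
def Claim_equal_calculate_group_width : Prop := ∀ (text : List String) (whitespace : String) (locations : List (Int × Int)), Dom_calculate_group_width text whitespace locations → Pre_calculate_group_width text whitespace locations → Spec_calculate_group_width text whitespace locations (calculate_group_width text whitespace locations)

-- ===== LEMMAS AND PROOFS =====


-- count of elements below / at / above a pivot partitions the count
theorem pv_countP_tri (xs : List Int) (pv : Int) (p : Int → Bool) :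
    (xs.filter (fun x => x < pv)).countP p + (xs.filter (fun x => x = pv)).countP p
      + (xs.filter (fun x => pv < x)).countP p = xs.countP p := by
  induction xs with
  | nil => simp
  | cons x t ih =>
    simp only [List.filter_cons, List.countP_cons]
    rcases lt_trichotomy x pv with h | h | h
    · simp only [decide_eq_true_eq, if_pos h, if_neg (ne_of_lt h), if_neg (not_lt_of_gt h),
        List.countP_cons]
      omega
    · subst h
      simp only [decide_eq_true_eq, if_neg (lt_irrefl x), if_true,
        List.countP_cons]
      omega
    · simp only [decide_eq_true_eq, if_neg (not_lt_of_gt h), if_neg (ne_of_gt h), if_pos h,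
        List.countP_cons]
      omega

-- pvSelect returns a member whose rank brackets k
theorem pv_select_bounds : ∀ (N : Nat) (xs : List Int) (k : Nat), xs.length ≤ N → xs ≠ [] → k < xs.length →
    pvSelect xs k ∈ xs ∧
      xs.countP (fun y => y < pvSelect xs k) ≤ k ∧
      k < xs.countP (fun y => y ≤ pvSelect xs k) := by
  intro N
  induction N with
  | zero =>
    intro xs k hN hne hk
    exact absurd (List.length_eq_zero_iff.mp (Nat.le_zero.mp hN)) hne
  | succ N ih =>
    intro xs k hN hne hk
    have hl0 : 0 < xs.length := List.length_pos_iff.mpr hne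
    have hlt2 : xs.length / 2 < xs.length := Nat.div_lt_self hl0 (by omega)
    set pivot := xs.getD (xs.length / 2) 0 with hpiv
    have hmem : pivot ∈ xs := by
      rw [hpiv, List.getD_eq_getElem xs 0 hlt2]; exact List.getElem_mem hlt2
    have hunfold : pvSelect xs k =
        if k < (xs.filter (fun x => x < pivot)).length then
          pvSelect (xs.filter (fun x => x < pivot)) k
        else if k < (xs.filter (fun x => x < pivot)).length + (xs.filter (fun x => x = pivot)).length then
          pivot
        else
          pvSelect (xs.filter (fun x => pivot < x))
            (k - (xs.filter (fun x => x < pivot)).length - (xs.filter (fun x => x = pivot)).length) := by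
      conv_lhs => rw [pvSelect]
      simp only [dif_neg hne]
      rw [← hpiv]
    have hsum : (xs.filter (fun x => x < pivot)).length + (xs.filter (fun x => x = pivot)).length
        + (xs.filter (fun x => pivot < x)).length = xs.length := by
      have := pv_countP_tri xs pivot (fun _ => true)
      simpa [List.countP_true] using this
    by_cases h1 : k < (xs.filter (fun x => x < pivot)).length
    · -- recurse on the < part
      have hlne : xs.filter (fun x => x < pivot) ≠ [] := by
        intro h; rw [h] at h1; simp at h1
      have hlenlt : (xs.filter (fun x => x < pivot)).length < xs.length :=
        pv_filter_lt hmem (decide_eq_false (lt_irrefl pivot))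
      obtain ⟨hmemr, hb1, hb2⟩ := ih (xs.filter (fun x => x < pivot)) k (by omega) hlne h1
      rw [hunfold, if_pos h1]
      set r := pvSelect (xs.filter (fun x => x < pivot)) k with hr
      have hrx : r ∈ xs := (List.mem_filter.mp hmemr).1
      have hrlt : r < pivot := by
        have := (List.mem_filter.mp hmemr).2; simpa using this
      have t1 := pv_countP_tri xs pivot (fun y => decide (y < r))
      have t2 := pv_countP_tri xs pivot (fun y => decide (y ≤ r))
      have e1 : (xs.filter (fun x => x = pivot)).countP (fun y => decide (y < r)) = 0 := by
        rw [List.countP_eq_zero]; intro a ha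
        have : a = pivot := by have := (List.mem_filter.mp ha).2; simpa using this
        simp only [decide_eq_true_eq]; omega
      have e2 : (xs.filter (fun x => pivot < x)).countP (fun y => decide (y < r)) = 0 := by
        rw [List.countP_eq_zero]; intro a ha
        have : pivot < a := by have := (List.mem_filter.mp ha).2; simpa using this
        simp only [decide_eq_true_eq]; omega
      have e3 : (xs.filter (fun x => x = pivot)).countP (fun y => decide (y ≤ r)) = 0 := by
        rw [List.countP_eq_zero]; intro a ha
        have : a = pivot := by have := (List.mem_filter.mp ha).2; simpa using this
        simp only [decide_eq_true_eq]; omega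
      have e4 : (xs.filter (fun x => pivot < x)).countP (fun y => decide (y ≤ r)) = 0 := by
        rw [List.countP_eq_zero]; intro a ha
        have : pivot < a := by have := (List.mem_filter.mp ha).2; simpa using this
        simp only [decide_eq_true_eq]; omega
      refine ⟨hrx, ?_, ?_⟩ <;> omega
    · by_cases h2 : k < (xs.filter (fun x => x < pivot)).length + (xs.filter (fun x => x = pivot)).length
      · -- pivot is the answer
        rw [hunfold, if_neg h1, if_pos h2]
        refine ⟨hmem, ?_, ?_⟩
        · rw [List.countP_eq_length_filter]; omega
        · have t2 := pv_countP_tri xs pivot (fun y => decide (y ≤ pivot))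
          have e1 : (xs.filter (fun x => x < pivot)).countP (fun y => decide (y ≤ pivot))
              = (xs.filter (fun x => x < pivot)).length := by
            rw [List.countP_eq_length]; intro a ha
            have : a < pivot := by have := (List.mem_filter.mp ha).2; simpa using this
            simp only [decide_eq_true_eq]; omega
          have e2 : (xs.filter (fun x => x = pivot)).countP (fun y => decide (y ≤ pivot))
              = (xs.filter (fun x => x = pivot)).length := by
            rw [List.countP_eq_length]; intro a ha
            have : a = pivot := by have := (List.mem_filter.mp ha).2; simpa using this
            simp only [decide_eq_true_eq]; omega
          omega
      · -- recurse on the > part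
        have hglen : k - (xs.filter (fun x => x < pivot)).length - (xs.filter (fun x => x = pivot)).length
            < (xs.filter (fun x => pivot < x)).length := by omega
        have hgne : xs.filter (fun x => pivot < x) ≠ [] := by
          intro h; rw [h] at hglen; simp at hglen
        have hlenlt : (xs.filter (fun x => pivot < x)).length < xs.length :=
          pv_filter_lt hmem (decide_eq_false (lt_irrefl pivot))
        obtain ⟨hmemr, hb1, hb2⟩ :=
          ih (xs.filter (fun x => pivot < x))
            (k - (xs.filter (fun x => x < pivot)).length - (xs.filter (fun x => x = pivot)).length)
            (by omega) hgne hglen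
        rw [hunfold, if_neg h1, if_neg h2]
        set r := pvSelect (xs.filter (fun x => pivot < x))
          (k - (xs.filter (fun x => x < pivot)).length - (xs.filter (fun x => x = pivot)).length) with hr
        have hrx : r ∈ xs := (List.mem_filter.mp hmemr).1
        have hrgt : pivot < r := by
          have := (List.mem_filter.mp hmemr).2; simpa using this
        have t1 := pv_countP_tri xs pivot (fun y => decide (y < r))
        have t2 := pv_countP_tri xs pivot (fun y => decide (y ≤ r))
        have e1 : (xs.filter (fun x => x < pivot)).countP (fun y => decide (y < r))
            = (xs.filter (fun x => x < pivot)).length := by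
          rw [List.countP_eq_length]; intro a ha
          have : a < pivot := by have := (List.mem_filter.mp ha).2; simpa using this
          simp only [decide_eq_true_eq]; omega
        have e2 : (xs.filter (fun x => x = pivot)).countP (fun y => decide (y < r))
            = (xs.filter (fun x => x = pivot)).length := by
          rw [List.countP_eq_length]; intro a ha
          have : a = pivot := by have := (List.mem_filter.mp ha).2; simpa using this
          simp only [decide_eq_true_eq]; omega
        have e3 : (xs.filter (fun x => x < pivot)).countP (fun y => decide (y ≤ r))
            = (xs.filter (fun x => x < pivot)).length := by
          rw [List.countP_eq_length]; intro a ha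
          have : a < pivot := by have := (List.mem_filter.mp ha).2; simpa using this
          simp only [decide_eq_true_eq]; omega
        have e4 : (xs.filter (fun x => x = pivot)).countP (fun y => decide (y ≤ r))
            = (xs.filter (fun x => x = pivot)).length := by
          rw [List.countP_eq_length]; intro a ha
          have : a = pivot := by have := (List.mem_filter.mp ha).2; simpa using this
          simp only [decide_eq_true_eq]; omega
        refine ⟨hrx, ?_, ?_⟩ <;> omega

-- the k-th element of a sorted list has the same rank bracket
theorem pv_sorted_count_bounds (s : List Int) (hs : s.Pairwise (· ≤ ·)) (k : Nat) (hk : k < s.length) :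
    s.countP (fun y => y < s[k]) ≤ k ∧ k < s.countP (fun y => y ≤ s[k]) := by
  have hmono := List.pairwise_iff_getElem.mp hs
  set v := s[k] with hv
  constructor
  · have hdrop : (s.drop k).countP (fun y => decide (y < v)) = 0 := by
      rw [List.countP_eq_zero]
      intro a ha
      obtain ⟨i, hi, rfl⟩ := List.mem_iff_getElem.mp ha
      have hki : k + i < s.length := by
        simp only [List.length_drop] at hi; omega
      have heq : (List.drop k s)[i] = s[k + i]'hki := List.getElem_drop
      rw [heq]
      have hle : v ≤ s[k + i]'hki := by
        rcases Nat.eq_zero_or_pos i with h0 | h0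
        · subst h0; rw [hv]; exact le_of_eq (by congr 1)
        · rw [hv]; exact hmono k (k + i) hk hki (by omega)
      simp only [decide_eq_true_eq]; omega
    have hsplit : s.countP (fun y => decide (y < v))
        = (s.take k).countP (fun y => decide (y < v)) + (s.drop k).countP (fun y => decide (y < v)) := by
      conv_lhs => rw [← List.take_append_drop k s]
      rw [List.countP_append]
    have htake : (s.take k).countP (fun y => decide (y < v)) ≤ (s.take k).length :=
      List.countP_le_length
    have hlen : (s.take k).length ≤ k := by simp [List.length_take]
    omega
  · have hlen : (s.take (k+1)).length = k + 1 := by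
      simp only [List.length_take]; omega
    have htake : (s.take (k+1)).countP (fun y => decide (y ≤ v)) = (s.take (k+1)).length := by
      rw [List.countP_eq_length]
      intro a ha
      obtain ⟨i, hi, rfl⟩ := List.mem_iff_getElem.mp ha
      have hil : i < k + 1 := by omega
      have his : i < s.length := by omega
      have heq : (s.take (k+1))[i] = s[i]'his := List.getElem_take
      rw [heq]
      have hle : s[i]'his ≤ v := by
        rcases Nat.lt_or_ge i k with h0 | h0
        · rw [hv]; exact hmono i k his hk h0
        · have hik : i = k := by omega
          subst hik; rw [hv]
      simp only [decide_eq_true_eq]; omega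
    have hsplit : s.countP (fun y => decide (y ≤ v))
        = (s.take (k+1)).countP (fun y => decide (y ≤ v)) + (s.drop (k+1)).countP (fun y => decide (y ≤ v)) := by
      conv_lhs => rw [← List.take_append_drop (k+1) s]
      rw [List.countP_append]
    omega

-- the rank bracket determines the value
theorem pv_count_unique {xs : List Int} {k : Nat} {a b : Int}
    (ha1 : xs.countP (fun y => y < a) ≤ k) (ha2 : k < xs.countP (fun y => y ≤ a))
    (hb1 : xs.countP (fun y => y < b) ≤ k) (hb2 : k < xs.countP (fun y => y ≤ b)) : a = b := by
  by_contra hne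
  rcases lt_or_gt_of_ne hne with h | h
  · have hm : xs.countP (fun y => y ≤ a) ≤ xs.countP (fun y => y < b) :=
      List.countP_mono_left (fun x _ hx => by simp only [decide_eq_true_eq] at *; omega)
    omega
  · have hm : xs.countP (fun y => y ≤ b) ≤ xs.countP (fun y => y < a) :=
      List.countP_mono_left (fun x _ hx => by simp only [decide_eq_true_eq] at *; omega)
    omega

-- quickselect computes the k-th order statistic
theorem pv_select_eq_sorted (xs : List Int) (k : Nat) (hne : xs ≠ []) (hk : k < xs.length) :
    pvSelect xs k = (PySem.List.sorted xs (fun x => x) false)[k]'(by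
      rw [PySem.List.length_sorted]; exact hk) := by
  obtain ⟨hmem, h1, h2⟩ := pv_select_bounds xs.length xs k le_rfl hne hk
  have hperm : (PySem.List.sorted xs (fun x => x) false).Perm xs := PySem.List.sorted_perm xs _ false
  have hp : (PySem.List.sorted xs (fun x => x) false).Pairwise (· ≤ ·) :=
    PySem.List.sorted_pairwise xs (fun x => x)
  have hk' : k < (PySem.List.sorted xs (fun x => x) false).length := by
    rw [PySem.List.length_sorted]; exact hk
  obtain ⟨c1, c2⟩ := pv_sorted_count_bounds _ hp k hk'
  exact pv_count_unique h1 h2 (by rw [← hperm.countP_eq]; exact c1) (by rw [← hperm.countP_eq]; exact c2)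

-- A's conditional tail scan over a sorted run equals the max of the qualifying elements
theorem pv_fold_pick_eq_max (c : Int) : ∀ (l : List Int) (a : Int), l.Pairwise (· ≤ ·) →
    (∀ x ∈ l, a ≤ x) →
    l.foldl (fun w x => if x < c then x else w) a = (l.filter (fun x => x < c)).foldl max a := by
  intro l
  induction l with
  | nil => simp
  | cons x t ih =>
    intro a hp hall
    have hax : a ≤ x := hall x (by simp)
    have hxt : ∀ y ∈ t, x ≤ y := (List.pairwise_cons.mp hp).1
    have hpt := (List.pairwise_cons.mp hp).2
    by_cases hc : x < c
    · rw [List.foldl_cons, if_pos hc, List.filter_cons, if_pos (by simpa using hc),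
        List.foldl_cons, max_eq_right hax]
      exact ih x hpt hxt
    · rw [List.foldl_cons, if_neg hc, List.filter_cons, if_neg (by simpa using hc)]
      exact ih a hpt (fun y hy => le_trans hax (hxt y hy))

-- the whole tail scan equals B's max over the filtered (unsorted) widths
theorem pv_tail_fold_eq_max (xs : List Int) (k : Nat) (hne : xs ≠ [])
    (hk : k < (PySem.List.sorted xs (fun x => x) false).length) (t c : Int)
    (ht : t = (PySem.List.sorted xs (fun x => x) false)[k]) (hc : c = t + 10) :
    ((PySem.List.sorted xs (fun x => x) false).drop (k+1)).foldl
        (fun w x => if x < c then x else w) t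
      = (PySem.List.max? (xs.filter (fun w => w < c)) (fun x => x)).getD 0 := by
  set s := PySem.List.sorted xs (fun x => x) false with hsdef
  have hperm : s.Perm xs := PySem.List.sorted_perm xs _ false
  have hpair : s.Pairwise (· ≤ ·) := PySem.List.sorted_pairwise xs (fun x => x)
  have htc : t < c := by omega
  have hts : t ∈ s := by rw [ht]; exact List.getElem_mem hk
  have htx : t ∈ xs := hperm.subset hts
  have hdp : (s.drop (k+1)).Pairwise (· ≤ ·) := hpair.drop
  have hge : ∀ x ∈ s.drop (k+1), t ≤ x := by
    intro x hx
    obtain ⟨i, hi, rfl⟩ := List.mem_iff_getElem.mp hx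
    have hki : k + 1 + i < s.length := by simp only [List.length_drop] at hi; omega
    have heq : (List.drop (k+1) s)[i] = s[k + 1 + i]'hki := List.getElem_drop
    rw [heq, ht]
    exact PySem.List.sorted_id_getElem_mono xs (by omega) hki
  rw [pv_fold_pick_eq_max c _ t hdp hge]
  cases hm : PySem.List.max? (xs.filter (fun w => w < c)) (fun x => x) with
  | none =>
    exfalso
    have hfe : xs.filter (fun w => w < c) = [] := (PySem.List.max?_eq_none_iff _ _).mp hm
    have htf : t ∈ xs.filter (fun w => w < c) := List.mem_filter.mpr ⟨htx, by simpa using htc⟩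
    rw [hfe] at htf
    simp at htf
  | some m =>
    simp only [Option.getD_some]
    have hmF := PySem.List.max?_mem hm
    have hmax := PySem.List.max?_isMax hm
    have hmx : m ∈ xs := (List.mem_filter.mp hmF).1
    have hmc : m < c := by have := (List.mem_filter.mp hmF).2; simpa using this
    have hms : m ∈ s := (hperm.symm).subset hmx
    have hle1 : t ≤ (List.filter (fun x => decide (x < c)) (s.drop (k+1))).foldl max t :=
      (PySem.List.le_foldl_max _ t).1
    have hmle : m ≤ (List.filter (fun x => decide (x < c)) (s.drop (k+1))).foldl max t := by
      obtain ⟨j, hj, rfl⟩ := List.mem_iff_getElem.mp hms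
      rcases Nat.lt_or_ge j (k+1) with hjk | hjk
      · have : s[j]'hj ≤ t := by
          rw [ht]
          rcases Nat.lt_or_ge j k with h0 | h0
          · exact PySem.List.sorted_id_getElem_mono xs (by omega) hk
          · have : j = k := by omega
            subst this; exact le_refl _
        omega
      · have hji : j - (k+1) < (s.drop (k+1)).length := by simp only [List.length_drop]; omega
        have heq : (s.drop (k+1))[j - (k+1)]'hji = s[j]'hj := by
          rw [List.getElem_drop]; congr 1; omega
        have hmem' : s[j]'hj ∈ s.drop (k+1) := heq ▸ List.getElem_mem hji
        have : s[j]'hj ∈ List.filter (fun x => decide (x < c)) (s.drop (k+1)) :=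
          List.mem_filter.mpr ⟨hmem', by simpa using hmc⟩
        exact (PySem.List.le_foldl_max _ t).2 _ this
    have hfle : (List.filter (fun x => decide (x < c)) (s.drop (k+1))).foldl max t ≤ m := by
      rcases PySem.List.foldl_max_mem (List.filter (fun x => decide (x < c)) (s.drop (k+1))) t with hv | hv
      · rw [hv]
        exact hmax t (List.mem_filter.mpr ⟨htx, by simpa using htc⟩)
      · have h1 := List.mem_filter.mp hv
        have h2 : (List.filter (fun x => decide (x < c)) (s.drop (k+1))).foldl max t ∈ xs :=
          hperm.subset (List.mem_of_mem_drop h1.1)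
        exact hmax _ (List.mem_filter.mpr ⟨h2, h1.2⟩)
    omega

-- min of a list is the head of its sorted order
theorem pv_min_eq_sorted_head (xs : List Int) (hne : xs ≠ []) :
    (PySem.List.min? xs (fun x => x)).getD 0 = PySem.List.pyGetD (PySem.List.sorted xs (fun x => x) false) 0 0 := by
  have hsne : PySem.List.sorted xs (fun x => x) false ≠ [] := by
    rw [ne_eq, PySem.List.sorted_eq_nil_iff]; exact hne
  obtain ⟨m, tl, hcons⟩ := List.exists_cons_of_ne_nil hsne
  have hperm : (PySem.List.sorted xs (fun x => x) false).Perm xs := PySem.List.sorted_perm xs _ false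
  have hhead := PySem.List.key_head_sorted_le xs (fun x => x) hcons
  have hmx : m ∈ xs := hperm.subset (by rw [hcons]; simp)
  cases hmn : PySem.List.min? xs (fun x => x) with
  | none =>
    exact absurd ((PySem.List.min?_eq_none_iff _ _).mp hmn) hne
  | some mn =>
    rw [hcons, PySem.List.pyGetD_zero_cons, Option.getD_some]
    have h1 : mn ≤ m := PySem.List.min?_isMin hmn m hmx
    have h2 : m ≤ mn := hhead mn (PySem.List.min?_mem hmn)
    omega

-- max of a list is the last element of its sorted order
theorem pv_max_eq_sorted_last (xs : List Int) (hne : xs ≠ []) :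
    (PySem.List.max? xs (fun x => x)).getD 0 = PySem.List.pyGetD (PySem.List.sorted xs (fun x => x) false) (-1) 0 := by
  set s := PySem.List.sorted xs (fun x => x) false with hsdef
  have hsne : s ≠ [] := by rw [hsdef, ne_eq, PySem.List.sorted_eq_nil_iff]; exact hne
  have hperm : s.Perm xs := PySem.List.sorted_perm xs _ false
  rw [PySem.List.pyGetD_neg_one s 0 hsne, List.getLast_eq_getElem hsne]
  have hlpos : 0 < s.length := List.length_pos_iff.mpr hsne
  have hlast : s[s.length - 1]'(by omega) ∈ xs := hperm.subset (List.getElem_mem (by omega))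
  cases hmx : PySem.List.max? xs (fun x => x) with
  | none => exact absurd ((PySem.List.max?_eq_none_iff _ _).mp hmx) hne
  | some m =>
    rw [Option.getD_some]
    have h1 : s[s.length - 1]'(by omega) ≤ m := PySem.List.max?_isMax hmx _ hlast
    have h2 : m ≤ s[s.length - 1]'(by omega) := by
      have hmem : m ∈ s := hperm.symm.subset (PySem.List.max?_mem hmx)
      obtain ⟨j, hj, rfl⟩ := List.mem_iff_getElem.mp hmem
      have hq2 : s.length - 1 < (PySem.List.sorted xs (fun x => x) false).length := by
        rw [← hsdef]; omega
      exact PySem.List.sorted_id_getElem_mono xs (by omega) hq2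
    omega

-- ===== VERDICT (by name: the statement is the Claim_ definition above) =====
theorem calculate_group_width_spec : Claim_equal_calculate_group_width := by
  intro text whitespace locations _hdom hpre
  obtain ⟨hne, _hinr⟩ := hpre
  unfold Spec_calculate_group_width
  simp only [calculate_group_width, calculate_group_width_alt,
    PySem.List.foldl_append_singleton_eq_map, List.nil_append]
  set f : Int × Int → Int := fun p => PySem.Str.len ((PySem.List.pyGet? text p.1).getD "") with hf
  set W := locations.map f with hW
  have hWne : W ≠ [] := by
    rw [hW]; exact fun h => hne (List.map_eq_nil_iff.mp h)
  set s := PySem.List.sorted W (fun x => x) false with hs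
  have hsl : s.length = W.length := by rw [hs]; exact PySem.List.length_sorted _ _ _
  by_cases h3 : W.length ≤ 3
  · rw [if_pos (show s.length ≤ 3 by omega), if_pos h3,
      pv_min_eq_sorted_head W hWne, ← hs]
  · have hmax : (PySem.List.max? W (fun x => x)).getD 0 = PySem.List.pyGetD s (-1) 0 := by
      rw [pv_max_eq_sorted_last W hWne, hs]
    rw [if_neg (show ¬ s.length ≤ 3 by omega), if_neg h3, hmax]
    by_cases h32 : PySem.Str.len whitespace + PySem.List.pyGetD s (-1) 0 < 32
    · rw [if_pos h32, if_pos h32]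
    · rw [if_neg h32, if_neg h32]
      set K : Nat := W.length * 75 / 100 with hK
      have hKlt : K < W.length := by
        rw [hK, Nat.div_lt_iff_lt_mul (by norm_num)]; omega
      have hKs : K < s.length := by omega
      have hKs' : K < (PySem.List.sorted W (fun x => x) false).length := by
        rw [← hs]; exact hKs
      have hn75 : PySem.Int.floordiv ((s.length : Int) * 75) 100 = (K : Int) := by
        rw [hsl]
        have h1 : ((W.length : Int) * 75) = ((W.length * 75 : Nat) : Int) := by push_cast; ring
        rw [h1, hK]
        exact_mod_cast PySem.Int.floordiv_natCast (W.length * 75) 100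
      rw [hn75]
      have htyp : PySem.List.pyGetD s ((K : Int)) 0 = s[K]'hKs := by
        rw [PySem.List.pyGetD_natCast, List.getD_eq_getElem s 0 hKs]
      rw [htyp]
      have hsl2 : s[K]'hKs = (PySem.List.sorted W (fun x => x) false)[K]'hKs' := by
        simp only [hs]
      have hsel : pvSelect W (W.length * 75 / 100) = s[K]'hKs := by
        rw [← hK, hsl2]
        exact pv_select_eq_sorted W K hWne hKlt
      rw [hsel]
      have hfold := PySem.List.foldl_pyRange_pyGetD' s 0
        (fun w x => if x < s[K]'hKs + 10 then x else w) (s[K]'hKs)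
        (a := (K : Int) + 1) (by positivity)
      have htn : ((K : Int) + 1).toNat = K + 1 := by omega
      rw [htn] at hfold
      rw [hfold]
      exact congrArg (fun z => min (36 - PySem.Str.len whitespace) z)
        (pv_tail_fold_eq_max W K hWne hKs' (s[K]'hKs) (s[K]'hKs + 10) hsl2 rfl)
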